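-- pv_equiv track=rewrite | github.com/mrbartrns/programmers-algorithm | lv1/whitespace.py | solution
-- ===== SOURCE A (Python) =====
-- def solution(s):
--     answer = ''
--     index = 0
--     for i in range(len(s)):
--         if index % 2 == 0:
--             answer += s[i].upper()
--         else:
--             answer += s[i].lower()
--         if s[i] == ' ':
--             index = 0
--         else:
--             index += 1
--     return answer
-- ===== SOURCE B (Python) =====
-- def solution(s):
--     return ' '.join(
--         ''.join(c.upper() if i % 2 == 0 else c.lower() for i, c in enumerate(word))
--         for word in s.split(' ')
--     )
-- ===== Notes on version B (the rewrite author's own statement) =====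
-- stated objective: idiomatic
-- what changed: Replaces the flat character loop with a manually reset parity counter by splitting the string on single spaces, alternating case per position within each word independently, and joining the words back with a space.
import Mathlib
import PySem

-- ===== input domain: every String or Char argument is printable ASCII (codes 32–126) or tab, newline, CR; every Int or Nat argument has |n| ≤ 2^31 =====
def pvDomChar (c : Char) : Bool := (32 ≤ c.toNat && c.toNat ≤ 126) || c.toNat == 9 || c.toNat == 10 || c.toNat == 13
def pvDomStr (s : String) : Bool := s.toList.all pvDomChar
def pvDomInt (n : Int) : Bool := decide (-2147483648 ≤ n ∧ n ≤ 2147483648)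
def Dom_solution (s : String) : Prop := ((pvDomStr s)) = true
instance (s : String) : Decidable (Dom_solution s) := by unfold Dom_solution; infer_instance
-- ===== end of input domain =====

-- B splits the string on single spaces and alternates case per position within each word,
-- instead of A's flat character loop with a manually reset counter (idiomatic decomposition, same cost).

-- ===== PORT A =====
-- flat loop: for i in range(len(s)), state = (answer, index)
def solutionStep (st : List Char × Int) (c : Char) : List Char × Int :=
  (st.1 ++ [if PySem.Int.mod st.2 2 == 0 then PySem.Chars.upperChar c
            else PySem.Chars.lowerChar c],
   if c == ' ' then (0 : Int) else st.2 + 1)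

def solution (s : String) : String :=
  String.ofList
    (((PySem.List.pyRange 0 (PySem.Str.len s)).foldl
        (fun st i => solutionStep st (PySem.List.pyGetD s.toList i ' '))
        ([], 0)).1)

-- ===== PORT B =====
-- ' '.join( per-word: enumerate and alternate case )
def solution_alt (s : String) : String :=
  String.ofList (PySem.Chars.join [' ']
    ((PySem.Chars.splitOn s.toList [' ']).map (fun w =>
      (PySem.List.enumerate w 0).map (fun p =>
        if PySem.Int.mod p.1 2 == 0 then PySem.Chars.upperChar p.2
        else PySem.Chars.lowerChar p.2))))

-- ===== PRECONDITION & SPEC =====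
def Spec_solution (s : String) (out : String) : Prop := out = solution_alt s
instance (s : String) (out : String) : Decidable (Spec_solution s out) := by unfold Spec_solution; infer_instance

-- ===== CLAIM (what is proved, stated in full; the proofs are below) =====
def Claim_equal_solution : Prop := ∀ (s : String), Dom_solution s → Spec_solution s (solution s)

-- ===== LEMMAS AND PROOFS =====

-- the per-character transformation both programs apply at in-word position k
def pvApp (k : Int) (c : Char) : Char :=
  if PySem.Int.mod k 2 == 0 then PySem.Chars.upperChar c else PySem.Chars.lowerChar c

-- split into words on ' ': (first word, remaining words)
def pvSplit : List Char → List Char × List (List Char)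
  | [] => ([], [])
  | c :: cs =>
    if c = ' ' then ([], (pvSplit cs).1 :: (pvSplit cs).2)
    else (c :: (pvSplit cs).1, (pvSplit cs).2)

-- case-alternation of a word starting at position k
def pvWord (k : Int) : List Char → List Char
  | [] => []
  | c :: cs => pvApp k c :: pvWord (k + 1) cs

-- A's loop as a recursive function
def pvRun : List Char → Int → List Char
  | [], _ => []
  | c :: cs, k => pvApp k c :: pvRun cs (if c = ' ' then 0 else k + 1)

theorem pvApp_space (k : Int) : pvApp k ' ' = ' ' := by
  unfold pvApp; split <;> decide

theorem pvSplitOn_go_spec (l : List Char) : ∀ (fuel : Nat) (cur : List Char)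
    (acc : List (List Char)), l.length ≤ fuel →
    PySem.Chars.splitOn.go [' '] fuel l cur acc
      = acc.reverse ++ (cur.reverse ++ (pvSplit l).1) :: (pvSplit l).2 := by
  induction l with
  | nil =>
    intro fuel cur acc _
    cases fuel <;> simp [PySem.Chars.splitOn.go, pvSplit]
  | cons c cs ih =>
    intro fuel cur acc hle
    cases fuel with
    | zero => simp at hle
    | succ f =>
      by_cases hc : c = ' '
      · subst hc
        have hpre : [' '].isPrefixOf (' ' :: cs) = true := by
          simp [List.isPrefixOf]
        simp only [PySem.Chars.splitOn.go, hpre, if_pos, List.length_singleton,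
          List.drop_succ_cons, List.drop_zero]
        rw [ih f [] (cur.reverse :: acc) (by simpa using hle)]
        simp [pvSplit]
      · have hpre : [' '].isPrefixOf (c :: cs) = false := by
          simp [List.isPrefixOf]; exact fun h => hc h.symm
        simp only [PySem.Chars.splitOn.go, hpre, Bool.false_eq_true, if_false]
        rw [ih f (c :: cur) acc (by simpa using Nat.le_of_succ_le_succ hle)]
        simp [pvSplit, hc]

theorem pvSplitOn_spec (l : List Char) :
    PySem.Chars.splitOn l [' '] = (pvSplit l).1 :: (pvSplit l).2 := by
  unfold PySem.Chars.splitOn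
  rw [pvSplitOn_go_spec l (l.length + 1) [] [] (by omega)]
  simp

theorem pvEnum_map (w : List Char) : ∀ (k : Int),
    (PySem.List.enumerate w k).map (fun p =>
      if PySem.Int.mod p.1 2 == 0 then PySem.Chars.upperChar p.2
      else PySem.Chars.lowerChar p.2) = pvWord k w := by
  induction w with
  | nil => intro k; simp [PySem.List.enumerate, pvWord]
  | cons c cs ih =>
    intro k
    have h : PySem.List.enumerate (c :: cs) k = (k, c) :: PySem.List.enumerate cs (k + 1) := by
      simp [PySem.List.enumerate]
    rw [h, List.map_cons, ih (k + 1)]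
    rfl

theorem pvJoin_space (p : List Char) (ps : List (List Char)) :
    PySem.Chars.join [' '] (p :: ps) = p ++ ps.flatMap (fun q => ' ' :: q) := by
  induction ps generalizing p with
  | nil => simp [PySem.Chars.join_singleton]
  | cons q qs ih =>
    rw [PySem.Chars.join_cons_cons, ih]
    simp

theorem pvRun_eq_words (l : List Char) : ∀ (k : Int),
    pvRun l k = pvWord k (pvSplit l).1
      ++ ((pvSplit l).2).flatMap (fun q => ' ' :: pvWord 0 q) := by
  induction l with
  | nil => intro k; simp [pvRun, pvSplit, pvWord]
  | cons c cs ih =>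
    intro k
    by_cases hc : c = ' '
    · subst hc
      simp [pvRun, pvSplit, pvWord, pvApp_space, ih 0]
    · simp [pvRun, pvSplit, pvWord, hc, ih (k + 1)]

theorem pvFold_run (l : List Char) : ∀ (ans : List Char) (k : Int),
    (l.foldl solutionStep (ans, k)).1 = ans ++ pvRun l k := by
  induction l with
  | nil => intro ans k; simp [pvRun]
  | cons c cs ih =>
    intro ans k
    rw [List.foldl_cons, solutionStep, ih]
    by_cases hc : c = ' ' <;> simp [pvRun, pvApp, hc]

-- ===== VERDICT (by name: the statement is the Claim_ definition above) =====
theorem solution_spec : Claim_equal_solution := by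
  intro s _
  unfold Spec_solution solution solution_alt
  apply String.toList_inj.mp
  rw [PySem.Str.len_eq,
    PySem.List.foldl_pyRange_zero_pyGetD' s.toList ' ' solutionStep ([], 0)]
  rw [pvSplitOn_spec]
  simp only [List.map_cons, pvEnum_map, pvJoin_space, pvFold_run]
  simp [pvRun_eq_words s.toList 0, List.flatMap_map]
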